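-- pv_equiv track=rewrite | github.com/nachai-l/cv-generator | functions/utils/skills_formatting.py | _normalize_skill_tokens
-- ===== SOURCE A (Python) =====
-- def _normalize_skill_tokens(s: str) -> list[str]:
--     """
--     Normalize a skill string into comparable tokens.
--     """
--     if not s:
--         return []
--
--     s = s.lower().strip()
--
--     for sep in ["&", "/", ",", "+", "|"]:
--         s = s.replace(sep, " ")
--
--     for ch in "()[].":
--         s = s.replace(ch, " ")
--
--     return [t for t in s.split() if t]
-- ===== SOURCE B (Python) =====
-- def _normalize_skill_tokens(s: str) -> list[str]:
--     """
--     Normalize a skill string into comparable tokens.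
--
--     Single character-by-character pass: any of & / , + | ( ) [ ] . or any
--     whitespace character ends the current token.
--     """
--     s = s.lower().strip()
--     if not s:
--         return []
--     seps = set("&/,+|()[].")
--     out: list[str] = []
--     buf: list[str] = []
--     for ch in s:
--         if ch in seps or ch.isspace():
--             if buf:
--                 out.append("".join(buf))
--                 buf = []
--         else:
--             buf.append(ch)
--     if buf:
--         out.append("".join(buf))
--     return out
-- ===== Notes on version B (the rewrite author's own statement) =====
-- stated objective: alternative
-- what changed: B replaces A's ten full-string replace passes plus a split pass with one single character-by-character scan that maintains a token buffer and emits tokens at separator/whitespace characters.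
import Mathlib
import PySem

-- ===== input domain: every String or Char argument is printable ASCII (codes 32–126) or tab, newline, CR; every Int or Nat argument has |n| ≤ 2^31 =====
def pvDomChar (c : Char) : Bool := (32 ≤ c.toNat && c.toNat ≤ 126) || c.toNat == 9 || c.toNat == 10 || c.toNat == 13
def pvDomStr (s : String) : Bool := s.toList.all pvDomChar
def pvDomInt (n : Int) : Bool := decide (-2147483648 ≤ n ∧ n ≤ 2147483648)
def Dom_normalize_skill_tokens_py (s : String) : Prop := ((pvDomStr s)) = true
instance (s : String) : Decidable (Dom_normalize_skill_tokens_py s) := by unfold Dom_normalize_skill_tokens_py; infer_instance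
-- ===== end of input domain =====

-- B does the same normalization in ONE character scan with a token buffer instead of
-- A's ten whole-string replace passes followed by split().

-- ===== PORT A =====
def normalize_skill_tokens_py (s : String) : List String :=
  if s = "" then []
  else
    let s1 := PySem.Str.strip (PySem.Str.lower s)
    let s2 := ["&", "/", ",", "+", "|"].foldl (fun t sep => PySem.Str.replace t sep " ") s1
    let s3 := "()[].".toList.foldl (fun t ch => PySem.Str.replace t (String.ofList [ch]) " ") s2
    (PySem.Str.split₀ s3).filter (fun t => !(t == ""))

-- ===== PORT B =====
def pvSep (c : Char) : Bool :=
  c == '&' || c == '/' || c == ',' || c == '+' || c == '|' ||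
  c == '(' || c == ')' || c == '[' || c == ']' || c == '.'

def pvTokGo : List Char → List Char → List String → List String
  | [], buf, out => if buf.isEmpty then out else out ++ [String.ofList buf]
  | c :: cs, buf, out =>
    if pvSep c || PySem.Chars.isspace c then
      if buf.isEmpty then pvTokGo cs [] out else pvTokGo cs [] (out ++ [String.ofList buf])
    else pvTokGo cs (buf ++ [c]) out

def normalize_skill_tokens_py_alt (s : String) : List String :=
  let t := PySem.Chars.strip (PySem.Chars.lower s.toList)
  if t.isEmpty then [] else pvTokGo t [] []

-- ===== PRECONDITION & SPEC =====
def Spec_normalize_skill_tokens_py (s : String) (out : List String) : Prop := out = normalize_skill_tokens_py_alt s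
instance (s : String) (out : List String) : Decidable (Spec_normalize_skill_tokens_py s out) := by unfold Spec_normalize_skill_tokens_py; infer_instance

-- ===== CLAIM (what is proved, stated in full; the proofs are below) =====
def Claim_equal_normalize_skill_tokens_py : Prop := ∀ (s : String), Dom_normalize_skill_tokens_py s → Spec_normalize_skill_tokens_py s (normalize_skill_tokens_py s)

-- ===== LEMMAS AND PROOFS =====

-- the single-char substitution A's ten replace passes amount to
def pvRep (c : Char) : Char := if pvSep c then ' ' else c

-- one single-char replace pass is a map
theorem pv_replace_go_single (a b : Char) :
    ∀ (l acc : List Char), PySem.Chars.replace.go [a] [b] l.length l acc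
      = acc.reverse ++ l.map (fun c => if c = a then b else c) := by
  intro l
  induction l with
  | nil => intro acc; simp [PySem.Chars.replace.go]
  | cons c t ih =>
    intro acc
    show PySem.Chars.replace.go [a] [b] (t.length + 1) (c :: t) acc = _
    by_cases h : c = a
    · subst h
      simp [PySem.Chars.replace.go, List.isPrefixOf, ih]
    · have hp : [a].isPrefixOf (c :: t) = false := by
        simp [List.isPrefixOf]; exact fun h' => h h'.symm
      simp [PySem.Chars.replace.go, hp, ih, h]

theorem pv_replace_single (a b : Char) (l : List Char) :
    PySem.Chars.replace l [a] [b] = l.map (fun c => if c = a then b else c) := by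
  rw [PySem.Chars.replace]
  simp [pv_replace_go_single]

-- the ten substitutions compose to pvRep
theorem pv_chain_eq_rep (c : Char) :
    (fun x => if x = '.' then ' ' else x)
      ((fun x => if x = ']' then ' ' else x)
      ((fun x => if x = '[' then ' ' else x)
      ((fun x => if x = ')' then ' ' else x)
      ((fun x => if x = '(' then ' ' else x)
      ((fun x => if x = '|' then ' ' else x)
      ((fun x => if x = '+' then ' ' else x)
      ((fun x => if x = ',' then ' ' else x)
      ((fun x => if x = '/' then ' ' else x)
      ((fun x => if x = '&' then ' ' else x) c))))))))) = pvRep c := by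
  by_cases h : c = '&' ∨ c = '/' ∨ c = ',' ∨ c = '+' ∨ c = '|' ∨ c = '(' ∨ c = ')' ∨ c = '[' ∨ c = ']' ∨ c = '.'
  · rcases h with h|h|h|h|h|h|h|h|h|h <;> subst h <;> decide
  · push_neg at h
    obtain ⟨n1,n2,n3,n4,n5,n6,n7,n8,n9,n10⟩ := h
    simp [pvRep, pvSep, n1,n2,n3,n4,n5,n6,n7,n8,n9,n10]


-- the ten map passes collapse to one map of pvRep
theorem pv_ten_maps (l : List Char) :
    (((((((((((l.map (fun x => if x = '&' then ' ' else x)).map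
      (fun x => if x = '/' then ' ' else x)).map
      (fun x => if x = ',' then ' ' else x)).map
      (fun x => if x = '+' then ' ' else x)).map
      (fun x => if x = '|' then ' ' else x)).map
      (fun x => if x = '(' then ' ' else x)).map
      (fun x => if x = ')' then ' ' else x)).map
      (fun x => if x = '[' then ' ' else x)).map
      (fun x => if x = ']' then ' ' else x)).map
      (fun x => if x = '.' then ' ' else x))) = l.map pvRep := by
  induction l with
  | nil => rfl
  | cons c t ih =>
    rw [List.map_cons, List.map_cons, List.map_cons, List.map_cons, List.map_cons,
        List.map_cons, List.map_cons, List.map_cons, List.map_cons, List.map_cons, ih]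
    exact congrArg (fun x => x :: t.map pvRep) (pv_chain_eq_rep c)

theorem pv_isspace_rep (c : Char) :
    PySem.Chars.isspace (pvRep c) = (pvSep c || PySem.Chars.isspace c) := by
  by_cases h : pvSep c = true
  · simp [pvRep, h]; decide
  · simp only [Bool.not_eq_true] at h
    simp [pvRep, h]

-- split₀ of the substituted string IS B's one-pass tokenizer
theorem pv_go_eq (cs : List Char) :
    ∀ (buf : List Char) (acc : List (List Char)),
      (PySem.Chars.split₀.go (cs.map pvRep) buf.reverse acc).map String.ofList
        = pvTokGo cs buf (acc.reverse.map String.ofList) := by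
  induction cs with
  | nil =>
    intro buf acc
    simp only [List.map_nil, PySem.Chars.split₀.go, pvTokGo, List.isEmpty_reverse,
      List.reverse_reverse]
    by_cases hb : buf.isEmpty <;> simp [hb]
  | cons c cs ih =>
    intro buf acc
    simp only [List.map_cons]
    show (PySem.Chars.split₀.go (pvRep c :: cs.map pvRep) buf.reverse acc).map String.ofList = _
    rw [show PySem.Chars.split₀.go (pvRep c :: cs.map pvRep) buf.reverse acc
        = if PySem.Chars.isspace (pvRep c) = true then
            (if buf.reverse.isEmpty = true then PySem.Chars.split₀.go (cs.map pvRep) [] acc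
             else PySem.Chars.split₀.go (cs.map pvRep) [] (buf.reverse.reverse :: acc))
          else PySem.Chars.split₀.go (cs.map pvRep) (pvRep c :: buf.reverse) acc from rfl]
    rw [pv_isspace_rep]
    by_cases hsep : (pvSep c || PySem.Chars.isspace c) = true
    · rw [if_pos hsep]
      rw [show pvTokGo (c :: cs) buf (acc.reverse.map String.ofList)
          = if pvSep c || PySem.Chars.isspace c then
              (if buf.isEmpty then pvTokGo cs [] (acc.reverse.map String.ofList)
               else pvTokGo cs [] (acc.reverse.map String.ofList ++ [String.ofList buf]))
            else pvTokGo cs (buf ++ [c]) (acc.reverse.map String.ofList) from rfl]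
      rw [if_pos hsep]
      by_cases hb : buf.isEmpty
      · simp only [List.isEmpty_reverse, hb, if_pos]
        have := ih [] acc
        simpa using this
      · simp only [List.isEmpty_reverse, hb, if_neg, Bool.not_eq_true, List.reverse_reverse]
        have := ih [] (buf :: acc)
        simp at this ⊢
        rw [this]
    · rw [if_neg hsep]
      have hs : pvSep c = false := by
        cases h : pvSep c
        · rfl
        · simp [h] at hsep
      have hrep : pvRep c = c := by simp [pvRep, hs]
      rw [hrep, show c :: buf.reverse = (buf ++ [c]).reverse by simp]
      rw [ih (buf ++ [c]) acc]
      rw [show pvTokGo (c :: cs) buf (acc.reverse.map String.ofList)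
          = if pvSep c || PySem.Chars.isspace c then
              (if buf.isEmpty then pvTokGo cs [] (acc.reverse.map String.ofList)
               else pvTokGo cs [] (acc.reverse.map String.ofList ++ [String.ofList buf]))
            else pvTokGo cs (buf ++ [c]) (acc.reverse.map String.ofList) from rfl]
      rw [if_neg hsep]

-- split₀ never emits an empty token
theorem pv_split₀_go_ne_nil : ∀ (cs cur : List Char) (acc : List (List Char)),
    (∀ t ∈ acc, t ≠ []) → ∀ t ∈ PySem.Chars.split₀.go cs cur acc, t ≠ [] := by
  intro cs
  induction cs with
  | nil =>
    intro cur acc hacc t ht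
    simp only [PySem.Chars.split₀.go] at ht
    by_cases hc : cur.isEmpty
    · simp [hc] at ht; exact hacc t ht
    · simp [hc] at ht
      rcases ht with h | h
      · exact hacc t h
      · subst h; simp [List.isEmpty_iff] at hc ⊢; simpa using hc
  | cons c rest ih =>
    intro cur acc hacc t ht
    simp only [PySem.Chars.split₀.go] at ht
    by_cases hsp : PySem.Chars.isspace c
    · simp only [hsp, if_pos] at ht
      by_cases hc : cur.isEmpty
      · simp only [hc, if_pos] at ht; exact ih [] acc hacc t ht
      · simp only [hc, Bool.false_eq_true, if_neg] at ht
        refine ih [] (cur.reverse :: acc) ?_ t ht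
        intro u hu
        rcases List.mem_cons.mp hu with h | h
        · subst h; simp [List.isEmpty_iff] at hc; simpa using hc
        · exact hacc u h
    · simp only [hsp, Bool.false_eq_true, if_neg] at ht
      exact ih (c :: cur) acc hacc t ht

-- split₀ as a String-level operation, with the empty-token filter a no-op
theorem pv_split₀_str (v : String) :
    (PySem.Str.split₀ v).filter (fun t => !(t == ""))
      = (PySem.Chars.split₀ v.toList).map String.ofList := by
  have h2 : PySem.Str.split₀ v = (PySem.Chars.split₀ v.toList).map String.ofList := by
    have h := congrArg (List.map String.ofList) (PySem.Str.split₀_map_toList v)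
    rw [List.map_map] at h
    rw [show (String.ofList ∘ String.toList) = id from funext (fun s => String.ofList_toList),
       List.map_id] at h
    exact h
  rw [h2, List.filter_eq_self.mpr]
  intro a ha
  obtain ⟨t, ht, rfl⟩ := List.mem_map.mp ha
  have hne : t ≠ [] := pv_split₀_go_ne_nil v.toList [] [] (by simp) t ht
  simpa [String.ofList_eq_empty_iff] using hne

-- A's port, pushed to the List Char level: ten replaces = one map pvRep
theorem pv_A_eq (u : String) (h : ¬ u = "") :
    normalize_skill_tokens_py u
      = (PySem.Chars.split₀ ((PySem.Chars.strip (PySem.Chars.lower u.toList)).map pvRep)).map String.ofList := by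
  unfold normalize_skill_tokens_py
  rw [if_neg h]
  rw [show ("()[].".toList) = ['(', ')', '[', ']', '.'] from by decide]
  simp only [List.foldl_cons, List.foldl_nil]
  rw [pv_split₀_str]
  refine congrArg (List.map String.ofList) (congrArg PySem.Chars.split₀ ?_)
  simp only [PySem.Str.toList_replace, PySem.Str.toList_strip, PySem.Str.toList_lower]
  rw [show ("&" : String).toList = ['&'] from by decide, show ("/" : String).toList = ['/'] from by decide,
      show ("," : String).toList = [','] from by decide, show ("+" : String).toList = ['+'] from by decide,
      show ("|" : String).toList = ['|'] from by decide, show (" " : String).toList = [' '] from by decide]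
  rw [show (String.ofList ['(']).toList = ['('] from by decide, show (String.ofList [')']).toList = [')'] from by decide,
      show (String.ofList ['[']).toList = ['['] from by decide, show (String.ofList [']']).toList = [']'] from by decide,
      show (String.ofList ['.']).toList = ['.'] from by decide]
  simp only [pv_replace_single]
  exact pv_ten_maps _

-- ===== VERDICT (by name: the statement is the Claim_ definition above) =====
theorem normalize_skill_tokens_py_spec : Claim_equal_normalize_skill_tokens_py := by
  intro s _
  unfold Spec_normalize_skill_tokens_py normalize_skill_tokens_py_alt
  by_cases hs : s = ""
  · subst hs; decide
  · rw [pv_A_eq s hs]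
    set t := PySem.Chars.strip (PySem.Chars.lower s.toList) with ht
    by_cases hte : t.isEmpty
    · rw [if_pos hte]
      rw [List.isEmpty_iff.mp hte]
      decide
    · rw [if_neg hte]
      have := pv_go_eq t [] []
      simpa using this
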